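-- pv_equiv track=rewrite | github.com/zahlabut/RunTempestMonitorPods | error_collector.py | _has_error_keywords_in_prefix
-- ===== SOURCE A (Python) =====
-- def _has_error_keywords_in_prefix(line: str) -> bool:
--     """
--     Check if error-related keywords appear in the first 50 characters of a line.
--
--     This is a FLEXIBLE detection method for logs that don't follow standard format.
--     Useful for:
--     - Test pod output (non-standard format)
--     - Different log formats from various services
--     - Tracebacks without standard timestamp prefix
--     - Connectivity/network issues
--     - System crashes and resource exhaustion
--     - Python/Java exception messages
--
--     Keywords checked (50+ keywords across categories):
--     - Error levels: ERROR, CRITICAL, FATAL, PANIC, FAIL, FAILED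
--     - Exceptions: EXCEPTION, TRACEBACK, RAISE, THROWN, *Error (Python/Java)
--     - Connectivity: TIMEOUT, REFUSED, UNREACHABLE, DISCONNECT, CONNECTION
--     - System: CRASH, HUNG, DEADLOCK, SEGFAULT, OOM, OUT OF MEMORY
--     - Access: DENIED, FORBIDDEN, UNAUTHORIZED, PERMISSION
--     - HTTP: HTTP 4XX/5XX, STATUS 4XX/5XX, 500, 502, 503, 504
--     - Database: ROLLBACK, CONSTRAINT, INTEGRITY
--     - Validation: INVALID, MALFORMED, UNEXPECTED
--
--     Args:
--         line: Log line to check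
--
--     Returns:
--         True if error keywords found in first 50 chars, False otherwise
--
--     Examples:
--         ✅ "{1} test.name [0.736s] ... FAILED" → True
--         ✅ "Traceback (most recent call last):" → True
--         ✅ "ERROR: Connection refused" → True
--         ✅ "CRITICAL: Database unavailable" → True
--         ✅ "Exception occurred while processing" → True
--         ✅ "Connection timeout after 30 seconds" → True
--         ✅ "KeyError: 'missing_key' not found" → True
--         ✅ "NullPointerException at line 42" → True
--         ✅ "Service unavailable (503)" → True
--         ❌ "This is a normal log line mentioning error later in the message..." → False
--     """
--     # Check first 50 characters only
--     prefix = line[:50].upper()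
--
--     # Comprehensive list of error keywords to detect potential problems
--     error_keywords = [
--         # Basic error levels
--         'ERROR', 'CRITICAL', 'FATAL', 'PANIC', 'FAIL', 'FAILED',
--
--         # Exception indicators
--         'EXCEPTION', 'TRACEBACK', 'RAISE', 'THROWN',
--
--         # Connectivity/Network issues
--         'TIMEOUT', 'TIMED OUT', 'REFUSED', 'UNREACHABLE', 'DISCONNECT',
--         'CONNECTION', 'CLOSED', 'BROKEN PIPE', 'RESET', 'ABORT',
--
--         # Python exceptions (common ones)
--         'KEYERROR', 'VALUEERROR', 'ATTRIBUTEERROR', 'TYPEERROR',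
--         'INDEXERROR', 'IMPORTERROR', 'RUNTIMEERROR', 'MEMORYERROR',
--         'OSERROR', 'IOERROR', 'ASSERTIONERROR',
--
--         # Java exceptions (common ones)
--         'NULLPOINTEREXCEPTION', 'OUTOFMEMORYERROR', 'STACKOVERFLOWERROR',
--         'ILLEGALARGUMENTEXCEPTION', 'CLASSNOTFOUNDEXCEPTION',
--
--         # System/Resource issues
--         'CRASH', 'HUNG', 'DEADLOCK', 'CORRUPT', 'SEGFAULT',
--         'CORE DUMP', 'OOM', 'OUT OF MEMORY',
--
--         # Access/Permission issues
--         'DENIED', 'FORBIDDEN', 'UNAUTHORIZED', 'PERMISSION',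
--
--         # Availability issues
--         'UNAVAILABLE', 'DOWN', 'OFFLINE', 'UNREACHABLE',
--
--         # Database issues
--         'ROLLBACK', 'CONSTRAINT', 'INTEGRITY',
--
--         # Validation issues
--         'INVALID', 'MALFORMED', 'UNEXPECTED',
--
--         # HTTP error codes (in text form for logs)
--         'HTTP 4', 'HTTP 5', 'STATUS 4', 'STATUS 5',
--         '500 ', '502 ', '503 ', '504 ',
--     ]
--
--     return any(keyword in prefix for keyword in error_keywords)
-- ===== SOURCE B (Python) =====
-- # B: one compiled alternation regex, a single automaton search over the
-- # 50-char uppercased prefix instead of ~66 separate substring scans.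
-- import re
--
-- _ERROR_KEYWORDS = [
--     'ERROR', 'CRITICAL', 'FATAL', 'PANIC', 'FAIL', 'FAILED',
--     'EXCEPTION', 'TRACEBACK', 'RAISE', 'THROWN',
--     'TIMEOUT', 'TIMED OUT', 'REFUSED', 'UNREACHABLE', 'DISCONNECT',
--     'CONNECTION', 'CLOSED', 'BROKEN PIPE', 'RESET', 'ABORT',
--     'KEYERROR', 'VALUEERROR', 'ATTRIBUTEERROR', 'TYPEERROR',
--     'INDEXERROR', 'IMPORTERROR', 'RUNTIMEERROR', 'MEMORYERROR',
--     'OSERROR', 'IOERROR', 'ASSERTIONERROR',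
--     'NULLPOINTEREXCEPTION', 'OUTOFMEMORYERROR', 'STACKOVERFLOWERROR',
--     'ILLEGALARGUMENTEXCEPTION', 'CLASSNOTFOUNDEXCEPTION',
--     'CRASH', 'HUNG', 'DEADLOCK', 'CORRUPT', 'SEGFAULT',
--     'CORE DUMP', 'OOM', 'OUT OF MEMORY',
--     'DENIED', 'FORBIDDEN', 'UNAUTHORIZED', 'PERMISSION',
--     'UNAVAILABLE', 'DOWN', 'OFFLINE', 'UNREACHABLE',
--     'ROLLBACK', 'CONSTRAINT', 'INTEGRITY',
--     'INVALID', 'MALFORMED', 'UNEXPECTED',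
--     'HTTP 4', 'HTTP 5', 'STATUS 4', 'STATUS 5',
--     '500 ', '502 ', '503 ', '504 ',
-- ]
--
-- _PAT = re.compile('|'.join(map(re.escape, _ERROR_KEYWORDS)))
--
--
-- def _has_error_keywords_in_prefix(line: str) -> bool:
--     return _PAT.search(line[:50].upper()) is not None
-- ===== Notes on version B (the rewrite author's own statement) =====
-- stated objective: idiomatic
-- what changed: B joins the escaped keywords into one compiled alternation regex at module load and answers with a single _PAT.search over the uppercased 50-char prefix, replacing A's 66 independent substring-containment scans.
import Mathlib
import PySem

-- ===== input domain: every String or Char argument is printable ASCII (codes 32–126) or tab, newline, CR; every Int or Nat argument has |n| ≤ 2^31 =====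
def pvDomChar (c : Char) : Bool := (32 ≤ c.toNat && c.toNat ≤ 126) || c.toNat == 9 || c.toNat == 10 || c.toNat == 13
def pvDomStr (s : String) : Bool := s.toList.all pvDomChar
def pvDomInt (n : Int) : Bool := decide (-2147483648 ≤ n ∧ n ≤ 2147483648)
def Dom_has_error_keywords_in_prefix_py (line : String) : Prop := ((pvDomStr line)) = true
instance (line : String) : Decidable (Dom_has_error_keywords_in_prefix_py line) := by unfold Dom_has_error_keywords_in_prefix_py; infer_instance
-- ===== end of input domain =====

-- B replaces A's 66 independent substring-containment scans of the uppercased 50-char prefix by one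
-- compiled regex alternation searched once (objective: idiomatic single-pass search).

-- ===== PORT A =====
-- the literal error_keywords list of A
def errorKeywordsA : List String := ["ERROR", "CRITICAL", "FATAL", "PANIC", "FAIL", "FAILED", "EXCEPTION", "TRACEBACK", "RAISE", "THROWN", "TIMEOUT", "TIMED OUT", "REFUSED", "UNREACHABLE", "DISCONNECT", "CONNECTION", "CLOSED", "BROKEN PIPE", "RESET", "ABORT", "KEYERROR", "VALUEERROR", "ATTRIBUTEERROR", "TYPEERROR", "INDEXERROR", "IMPORTERROR", "RUNTIMEERROR", "MEMORYERROR", "OSERROR", "IOERROR", "ASSERTIONERROR", "NULLPOINTEREXCEPTION", "OUTOFMEMORYERROR", "STACKOVERFLOWERROR", "ILLEGALARGUMENTEXCEPTION", "CLASSNOTFOUNDEXCEPTION", "CRASH", "HUNG", "DEADLOCK", "CORRUPT", "SEGFAULT", "CORE DUMP", "OOM", "OUT OF MEMORY", "DENIED", "FORBIDDEN", "UNAUTHORIZED", "PERMISSION", "UNAVAILABLE", "DOWN", "OFFLINE", "UNREACHABLE", "ROLLBACK", "CONSTRAINT", "INTEGRITY", "INVALID", "MALFORMED", "UNEXPECTED",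 "HTTP 4", "HTTP 5", "STATUS 4", "STATUS 5", "500 ", "502 ", "503 ", "504 "]

def has_error_keywords_in_prefix_py (line : String) : Bool :=
  let pfx := PySem.Chars.upper (PySem.List.slice line.toList none (some 50))
  errorKeywordsA.any (fun keyword => PySem.Chars.isIn keyword.toList pfx)

-- ===== PORT B =====
-- B's module constant _PAT = re.compile('|'.join(map(re.escape, _ERROR_KEYWORDS))).
-- No regex engine exists in Lean, so the compiled pattern is ported by hand as the
-- list of its alternatives: the '|'-joined pattern source split back on '|'.  This is
-- exact here because re.escape is the identity on these keywords (letters, digits,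
-- spaces only, none contain '|').
def patAlternatives : List (List Char) :=
  "ERROR|CRITICAL|FATAL|PANIC|FAIL|FAILED|EXCEPTION|TRACEBACK|RAISE|THROWN|TIMEOUT|TIMED OUT|REFUSED|UNREACHABLE|DISCONNECT|CONNECTION|CLOSED|BROKEN PIPE|RESET|ABORT|KEYERROR|VALUEERROR|ATTRIBUTEERROR|TYPEERROR|INDEXERROR|IMPORTERROR|RUNTIMEERROR|MEMORYERROR|OSERROR|IOERROR|ASSERTIONERROR|NULLPOINTEREXCEPTION|OUTOFMEMORYERROR|STACKOVERFLOWERROR|ILLEGALARGUMENTEXCEPTION|CLASSNOTFOUNDEXCEPTION|CRASH|HUNG|DEADLOCK|CORRUPT|SEGFAULT|CORE DUMP|OOM|OUT OF MEMORY|DENIED|FORBIDDEN|UNAUTHORIZED|PERMISSION|UNAVAILABLE|DOWN|OFFLINE|UNREACHABLE|ROLLBACK|CONSTRAINT|INTEGRITY|INVALID|MALFORMED|UNEXPECTED|HTTP 4|HTTP 5|STATUS 4|STATUS 5|500 |502 |503 |504 ".toList.splitOn '|'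

-- `_PAT.search(pfx) is not None`, ported by hand as re.search's semantics on an
-- alternation of literals: try each start position left to right and, at each, the
-- alternatives in pattern order; exact for this pattern (no metacharacters).
def has_error_keywords_in_prefix_py_alt (line : String) : Bool :=
  let pfx := PySem.Chars.upper (PySem.List.slice line.toList none (some 50))
  (PySem.List.pyRange 0 (pfx.length : Int) 1).any (fun i =>
    patAlternatives.any (fun k =>
      PySem.Chars.startswith (PySem.List.slice pfx (some i) none) k))

-- ===== PRECONDITION & SPEC =====
def Spec_has_error_keywords_in_prefix_py (line : String) (out : Bool) : Prop := out = has_error_keywords_in_prefix_py_alt line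
instance (line : String) (out : Bool) : Decidable (Spec_has_error_keywords_in_prefix_py line out) := by unfold Spec_has_error_keywords_in_prefix_py; infer_instance

-- ===== CLAIM (what is proved, stated in full; the proofs are below) =====
def Claim_equal_has_error_keywords_in_prefix_py : Prop := ∀ (line : String), Dom_has_error_keywords_in_prefix_py line → Spec_has_error_keywords_in_prefix_py line (has_error_keywords_in_prefix_py line)

-- ===== LEMMAS AND PROOFS =====

-- the pattern's alternatives are exactly A's keyword list (as char lists)
set_option maxRecDepth 8000 in
set_option maxHeartbeats 1600000 in
lemma patAlternatives_eq : patAlternatives = errorKeywordsA.map String.toList := by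
  have h1 : "ERROR|CRITICAL|FATAL|PANIC|FAIL|FAILED|EXCEPTION|TRACEBACK|RAISE|THROWN|TIMEOUT|TIMED OUT|REFUSED|UNREACHABLE|DISCONNECT|CONNECTION|CLOSED|BROKEN PIPE|RESET|ABORT|KEYERROR|VALUEERROR|ATTRIBUTEERROR|TYPEERROR|INDEXERROR|IMPORTERROR|RUNTIMEERROR|MEMORYERROR|OSERROR|IOERROR|ASSERTIONERROR|NULLPOINTEREXCEPTION|OUTOFMEMORYERROR|STACKOVERFLOWERROR|ILLEGALARGUMENTEXCEPTION|CLASSNOTFOUNDEXCEPTION|CRASH|HUNG|DEADLOCK|CORRUPT|SEGFAULT|CORE DUMP|OOM|OUT OF MEMORY|DENIED|FORBIDDEN|UNAUTHORIZED|PERMISSION|UNAVAILABLE|DOWN|OFFLINE|UNREACHABLE|ROLLBACK|CONSTRAINT|INTEGRITY|INVALID|MALFORMED|UNEXPECTED|HTTP 4|HTTP 5|STATUS 4|STATUS 5|500 |502 |503 |504 ".toList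
      = [('|' : Char)].intercalate (errorKeywordsA.map String.toList) := by decide
  have hx : ∀ l ∈ errorKeywordsA.map String.toList, ('|' : Char) ∉ l := by decide
  have hn : errorKeywordsA.map String.toList ≠ [] := by decide
  rw [patAlternatives, h1, List.splitOn_intercalate _ '|' hx hn]

-- every keyword is nonempty
lemma errorKeywordsA_ne_nil : ∀ k ∈ errorKeywordsA, k.toList ≠ [] := by decide

-- keyword-major substring scan = position-major literal-match search, for any list of nonempty keywords
lemma scan_eq (kws : List String) (hne : ∀ k ∈ kws, k.toList ≠ []) (p : List Char) :
    (kws.any fun keyword => PySem.Chars.isIn keyword.toList p) =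
    ((PySem.List.pyRange 0 (p.length : Int) 1).any fun i =>
      (kws.map String.toList).any fun k =>
        PySem.Chars.startswith (PySem.List.slice p (some i) none) k) := by
  rw [Bool.eq_iff_iff]
  simp only [List.any_eq_true, List.mem_map]
  constructor
  · rintro ⟨k, hk, hin⟩
    obtain ⟨j, hj⟩ := (PySem.Chars.exists_prefix_drop_iff_isIn k.toList p).2 hin
    have hjlt : j < p.length := by
      by_contra h
      have hd : p.drop j = [] := List.drop_eq_nil_of_le (by omega)
      rw [hd] at hj
      exact hne k hk (List.prefix_nil.1 hj)
    refine ⟨(j : Int), ?_, k.toList, ⟨k, hk, rfl⟩, ?_⟩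
    · rw [PySem.List.mem_pyRange_one]; omega
    · rw [PySem.List.slice_from p (by omega)]
      simpa [PySem.Chars.startswith_iff] using hj
  · rintro ⟨i, hi, _, ⟨k, hk, rfl⟩, hsw⟩
    rw [PySem.List.mem_pyRange_one] at hi
    refine ⟨k, hk, ?_⟩
    rw [PySem.List.slice_from p hi.1, PySem.Chars.startswith_iff] at hsw
    exact (PySem.Chars.exists_prefix_drop_iff_isIn k.toList p).1 ⟨i.toNat, hsw⟩

-- ===== VERDICT (by name: the statement is the Claim_ definition above) =====
theorem has_error_keywords_in_prefix_py_spec : Claim_equal_has_error_keywords_in_prefix_py := by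
  intro line _
  show has_error_keywords_in_prefix_py line = has_error_keywords_in_prefix_py_alt line
  unfold has_error_keywords_in_prefix_py has_error_keywords_in_prefix_py_alt
  simp only [patAlternatives_eq]
  exact scan_eq errorKeywordsA errorKeywordsA_ne_nil _
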